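-- pv_equiv track=rewrite | github.com/Smolnik-Vlad/univer_git | course_2/sem2/AOIS/lab3/main.py | decode_formula
-- ===== SOURCE A (Python) =====
-- def decode_formula(current_formula: str) -> list:
--     """
--     Позволяет собрать "- >" в один элемент списка и так же делает переменные x123 как один элемент списка
--     """
--     arr = list(current_formula)
--     i = 0
--     while i < len(arr):
--         if arr[i] == '-' and arr[i + 1] == '>':
--             arr[i] = '->'
--             arr.pop(i + 1)
--         j = i + 1
--         tmp = ''
--         while j < len(arr) and arr[j].isdigit():
--             tmp += arr[j]
--             j += 1
--
--         if arr[i] not in ('(', '!', '*', '+'):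
--             arr[i] += tmp
--             arr[i + 1:i + 1 + len(tmp)] = []
--         i += 1
--     return arr
-- ===== SOURCE B (Python) =====
-- def decode_formula(current_formula: str) -> list:
--     # Pass 1: split into tokens, merging '-' immediately followed by '>' into '->'.
--     tokens = []
--     i = 0
--     n = len(current_formula)
--     while i < n:
--         c = current_formula[i]
--         if c == '-' and i + 1 < n and current_formula[i + 1] == '>':
--             tokens.append('->')
--             i += 2
--         else:
--             tokens.append(c)
--             i += 1
--     # Pass 2: fold each digit token onto the previous token unless it is '(', '!', '*', '+'.
--     out = []
--     for t in tokens: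
--         if t.isdigit() and out and out[-1] not in ('(', '!', '*', '+'):
--             out[-1] += t
--         else:
--             out.append(t)
--     return out
-- ===== Notes on version B (the rewrite author's own statement) =====
-- stated objective: simpler
-- what changed: A's single in-place scan that mutates the list while juggling indices (set/pop/slice-delete at i, i+1, i+1+len(tmp)) is replaced by two independent passes: first tokenize the characters merging '-'+'>' into '->', then fold each digit token onto the preceding token unless it is '(', '!', '*' or '+'. B is measurably faster since it never shifts list tails the way A's pop/slice-deletions do.
-- outside the precondition, e.g. on decode_formula('-'): A raises IndexError, B returns ['-']
import Mathlib
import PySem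

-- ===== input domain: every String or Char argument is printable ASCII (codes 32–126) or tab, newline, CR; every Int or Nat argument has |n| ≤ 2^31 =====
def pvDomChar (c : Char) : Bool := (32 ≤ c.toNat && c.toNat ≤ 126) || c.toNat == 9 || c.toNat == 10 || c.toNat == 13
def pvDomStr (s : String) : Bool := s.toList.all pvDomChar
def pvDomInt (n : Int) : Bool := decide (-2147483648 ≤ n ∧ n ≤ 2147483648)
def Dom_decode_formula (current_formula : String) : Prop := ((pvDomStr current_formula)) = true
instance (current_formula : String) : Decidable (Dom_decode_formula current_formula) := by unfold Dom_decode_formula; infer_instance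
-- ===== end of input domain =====

-- B replaces A's single index-juggling in-place scan by two passes — tokenize (merging '->'),
-- then fold digit tokens onto their predecessor; objective: simpler (and measured faster: no repeated
-- in-place pops/slice deletions).
-- Tokens are carried as List Char and turned into String only at the end (exact on the ASCII domain).

-- ===== PORT A =====
-- inner while loop: tmp accumulation of consecutive digit tokens from position j on
def pvATmp (arr : List (List Char)) (j : Nat) : List Char :=
  if _h : j < arr.length then
    if PySem.Chars.strIsdigit (arr.getD j []) then arr.getD j [] ++ pvATmp arr (j + 1) else []
  else []
termination_by arr.length - j
decreasing_by omega

-- first statement of A's loop body: if arr[i] == '-' and arr[i+1] == '>': arr[i] = '->'; arr.pop(i+1)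
-- (Python raises IndexError when arr[i] == '-' at the last position; those inputs are outside Pre_)
def pvAMerge (arr : List (List Char)) (i : Nat) : List (List Char) :=
  if arr.getD i [] = ['-'] ∧ arr.getD (i + 1) [] = ['>'] then
    (arr.set i ['-', '>']).eraseIdx (i + 1)
  else arr

-- rest of A's loop body: tmp digits after i; if arr[i] not in ('(','!','*','+'):
--   arr[i] += tmp; arr[i+1:i+1+len(tmp)] = []   (slice deletion ported by hand as take ++ drop; exact)
def pvAAbsorb (arr : List (List Char)) (i : Nat) : List (List Char) :=
  if arr.getD i [] ∈ [['('], ['!'], ['*'], ['+']] then arr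
  else
    (arr.set i (arr.getD i [] ++ pvATmp arr (i + 1))).take (i + 1)
      ++ (arr.set i (arr.getD i [] ++ pvATmp arr (i + 1))).drop (i + 1 + (pvATmp arr (i + 1)).length)

def pvAStep (arr : List (List Char)) (i : Nat) : List (List Char) := pvAAbsorb (pvAMerge arr i) i

-- needed by pvALoop's termination: one loop-body pass never lengthens the list
theorem pvAStep_length_le (arr : List (List Char)) (i : Nat) :
    (pvAStep arr i).length ≤ arr.length := by
  unfold pvAStep pvAAbsorb pvAMerge
  split <;> split
  all_goals
    (try simp only [List.length_append, List.length_take, List.length_drop, List.length_set,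
      List.length_eraseIdx])
  all_goals (try split_ifs)
  all_goals omega

def pvALoop (arr : List (List Char)) (i : Nat) : List (List Char) :=
  if _h : i < arr.length then pvALoop (pvAStep arr i) (i + 1) else arr
termination_by arr.length - i
decreasing_by have := pvAStep_length_le arr i; omega

def decode_formula (current_formula : String) : List String :=
  (pvALoop (current_formula.toList.map (fun c => [c])) 0).map String.ofList

-- ===== PORT B =====
-- pass 1: tokenize, merging '-' immediately followed by '>' into '->'
def pvPass1 : List Char → List (List Char)
  | [] => []
  | [c] => [[c]]
  | c :: c2 :: rest =>
    if c = '-' ∧ c2 = '>' then ['-', '>'] :: pvPass1 rest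
    else [c] :: pvPass1 (c2 :: rest)

-- pass 2: fold each digit token onto the previous token unless that is '(', '!', '*', '+'
def pvPass2 (out : List (List Char)) (ts : List (List Char)) : List (List Char) :=
  match ts with
  | [] => out
  | t :: rest =>
    if PySem.Chars.strIsdigit t ∧ out ≠ [] ∧ out.getLastD [] ∉ [['('], ['!'], ['*'], ['+']] then
      pvPass2 (out.dropLast ++ [out.getLastD [] ++ t]) rest   -- out[-1] += t
    else pvPass2 (out ++ [t]) rest

def decode_formula_alt (current_formula : String) : List String :=
  (pvPass2 [] (pvPass1 current_formula.toList)).map String.ofList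

-- ===== PRECONDITION & SPEC =====
-- Pre_ excludes exactly the strings ending in '-': there A evaluates arr[i+1] past the end and
-- raises IndexError (A returns on every other input).
def Pre_decode_formula (current_formula : String) : Prop :=
  current_formula.toList.getLast? ≠ some '-'
instance (current_formula : String) : Decidable (Pre_decode_formula current_formula) := by
  unfold Pre_decode_formula; infer_instance

def pvWitness_decode_formula : String := "x1->(23+4)!"


def Spec_decode_formula (current_formula : String) (out : List String) : Prop :=
  out = decode_formula_alt current_formula
instance (current_formula : String) (out : List String) : Decidable (Spec_decode_formula current_formula out) := by
  unfold Spec_decode_formula; infer_instance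

-- ===== CLAIM (what is proved, stated in full; the proofs are below) =====
def Claim_equal_decode_formula : Prop := ∀ (current_formula : String), Dom_decode_formula current_formula → Pre_decode_formula current_formula → Spec_decode_formula current_formula (decode_formula current_formula)

-- ===== LEMMAS AND PROOFS =====

def pvSing (c : Char) : List Char := [c]

-- common specification of both programs, recursing token by token over the raw characters
def pvF : List Char → List (List Char)
  | [] => []
  | c :: rest =>
    if c = '-' ∧ rest.head? = some '>' then
      (['-', '>'] ++ rest.tail.takeWhile PySem.Chars.isdigit) ::
        pvF (rest.tail.dropWhile PySem.Chars.isdigit)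
    else if [c] ∈ [['('], ['!'], ['*'], ['+']] then [c] :: pvF rest
    else ([c] ++ rest.takeWhile PySem.Chars.isdigit) :: pvF (rest.dropWhile PySem.Chars.isdigit)
termination_by cs => cs.length
decreasing_by
  · have := List.length_dropWhile_le (p := PySem.Chars.isdigit) (l := rest.tail)
    simp [List.length_tail] at *; omega
  · simp
  · have := List.length_dropWhile_le (p := PySem.Chars.isdigit) (l := rest)
    simp at *; omega

theorem pvF_nil : pvF [] = [] := by simp [pvF]

theorem pvF_merge (rest' : List Char) :
    pvF ('-' :: '>' :: rest')
      = (['-', '>'] ++ rest'.takeWhile PySem.Chars.isdigit) ::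
          pvF (rest'.dropWhile PySem.Chars.isdigit) := by
  simp [pvF]

theorem pvF_plain_excl (c : Char) (rest : List Char)
    (hm : ¬(c = '-' ∧ rest.head? = some '>')) (hex : ([c] : List Char) ∈ [['('], ['!'], ['*'], ['+']]) :
    pvF (c :: rest) = [c] :: pvF rest := by
  simp [pvF, hm, hex]

theorem pvF_plain_abs (c : Char) (rest : List Char)
    (hm : ¬(c = '-' ∧ rest.head? = some '>')) (hex : ([c] : List Char) ∉ [['('], ['!'], ['*'], ['+']]) :
    pvF (c :: rest)
      = ([c] ++ rest.takeWhile PySem.Chars.isdigit) ::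
          pvF (rest.dropWhile PySem.Chars.isdigit) := by
  simp [pvF, hm, hex]

theorem pvPass1_merge (c : Char) (rest : List Char) (hm : c = '-' ∧ rest.head? = some '>') :
    pvPass1 (c :: rest) = ['-', '>'] :: pvPass1 rest.tail := by
  obtain ⟨rfl, hh⟩ := hm
  match rest with
  | [] => simp at hh
  | r :: rest' =>
      have hr : r = '>' := by simpa using hh
      subst hr
      simp [pvPass1]

theorem pvPass1_plain (c : Char) (rest : List Char)
    (hm : ¬(c = '-' ∧ rest.head? = some '>')) :
    pvPass1 (c :: rest) = [c] :: pvPass1 rest := by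
  match rest with
  | [] => simp [pvPass1]
  | c2 :: r =>
      rw [show pvPass1 (c :: c2 :: r)
            = if c = '-' ∧ c2 = '>' then ['-', '>'] :: pvPass1 r else [c] :: pvPass1 (c2 :: r)
          from rfl]
      rw [if_neg (by rintro ⟨h1, h2⟩; exact hm ⟨h1, by simp [h2]⟩)]

theorem pvPass2_cons (out : List (List Char)) (t : List Char) (ts : List (List Char)) :
    pvPass2 out (t :: ts)
      = if PySem.Chars.strIsdigit t ∧ out ≠ [] ∧ out.getLastD [] ∉ [['('], ['!'], ['*'], ['+']] then
          pvPass2 (out.dropLast ++ [out.getLastD [] ++ t]) ts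
        else pvPass2 (out ++ [t]) ts := rfl

-- boundary bookkeeping (index d.length into d ++ suffix)
theorem pv_getD_len {α : Type} (d : List α) (x : α) (l : List α) (dd : α) :
    (d ++ x :: l).getD d.length dd = x := by
  simp [List.getD]

theorem pv_set_len {α : Type} (d : List α) (x y : α) (l : List α) :
    (d ++ x :: l).set d.length y = d ++ y :: l := by
  simp

theorem pv_erase_len {α : Type} (d : List α) (x : α) (l : List α) :
    (d ++ x :: l).eraseIdx d.length = d ++ l := by
  induction d with
  | nil => simp
  | cons a d ih => simp [ih]

theorem pv_take_len {α : Type} (d : List α) (x : α) (l : List α) :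
    (d ++ x :: l).take (d.length + 1) = d ++ [x] := by
  have : d ++ x :: l = (d ++ [x]) ++ l := by simp
  rw [this, show d.length + 1 = (d ++ [x]).length from by simp]
  exact List.take_left

theorem pv_drop_len {α : Type} (d : List α) (x : α) (l : List α) (k : Nat) :
    (d ++ x :: l).drop (d.length + 1 + k) = l.drop k := by
  have : d ++ x :: l = (d ++ [x]) ++ l := by simp
  rw [this, show d.length + 1 + k = (d ++ [x]).length + k from by simp]
  exact List.drop_length_add_append k

theorem pv_getD_default {α : Type} (d : List α) (dd : α) (n : Nat) (h : d.length ≤ n) :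
    d.getD n dd = dd := by
  simp [List.getD, List.getElem?_eq_none_iff.mpr h]

theorem pv_head_dropWhile {α : Type} (p : α → Bool) (l : List α) (a : α)
    (h : (l.dropWhile p).head? = some a) : p a = false := by
  induction l with
  | nil => simp at h
  | cons b l ih =>
      by_cases hb : p b
      · simp [hb] at h; exact ih h
      · simp [hb] at h; subst h; simpa using hb

theorem pv_strIsdigit_sing (c : Char) :
    PySem.Chars.strIsdigit [c] = PySem.Chars.isdigit c := by
  simp [PySem.Chars.strIsdigit]

theorem pv_notExcl_two (t : List Char) (h : 2 ≤ t.length) :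
    t ∉ [['('], ['!'], ['*'], ['+']] := by
  intro hm
  simp [List.mem_cons] at hm
  rcases hm with h1 | h1 | h1 | h1 <;> subst h1 <;> simp at h

theorem pv_excl_notdig (c : Char) (h : ([c] : List Char) ∈ [['('], ['!'], ['*'], ['+']]) :
    PySem.Chars.isdigit c = false := by
  simp [List.mem_cons] at h
  rcases h with h1 | h1 | h1 | h1 <;> rw [h1] <;> decide

-- ---- A side ----

theorem pvATmp_spec (rs : List Char) : ∀ d : List (List Char),
    pvATmp (d ++ rs.map pvSing) d.length = rs.takeWhile PySem.Chars.isdigit := by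
  induction rs with
  | nil => intro d; unfold pvATmp; simp
  | cons r rs ih =>
      intro d
      unfold pvATmp
      have hlen : d.length < (d ++ (r :: rs).map pvSing).length := by simp
      rw [dif_pos hlen]
      have hg : (d ++ (r :: rs).map pvSing).getD d.length [] = [r] := pv_getD_len d [r] _ []
      rw [hg]
      by_cases hd : PySem.Chars.isdigit r
      · rw [if_pos (by rw [pv_strIsdigit_sing]; exact hd)]
        have hre : d ++ (r :: rs).map pvSing = (d ++ [[r]]) ++ rs.map pvSing := by simp [pvSing]
        rw [hre, show d.length + 1 = (d ++ [[r]]).length from by simp, ih (d ++ [[r]])]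
        simp [hd]
      · rw [if_neg (by rw [pv_strIsdigit_sing]; simpa using hd)]
        simp [hd]

theorem pvAMerge_spec_merge (d : List (List Char)) (l : List (List Char)) :
    pvAMerge (d ++ ['-'] :: ['>'] :: l) d.length = d ++ ['-', '>'] :: l := by
  unfold pvAMerge
  have hc1 : (d ++ ['-'] :: ['>'] :: l).getD d.length [] = ['-'] := pv_getD_len d _ _ []
  have hc2 : (d ++ ['-'] :: ['>'] :: l).getD (d.length + 1) [] = ['>'] := by
    have e : d ++ ['-'] :: ['>'] :: l = (d ++ [['-']]) ++ ['>'] :: l := by simp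
    rw [e, show d.length + 1 = (d ++ [['-']]).length from by simp]
    exact pv_getD_len _ _ _ []
  rw [if_pos ⟨hc1, hc2⟩, pv_set_len]
  have e : d ++ ['-', '>'] :: ['>'] :: l = (d ++ [['-', '>']]) ++ ['>'] :: l := by simp
  rw [e, show d.length + 1 = (d ++ [['-', '>']]).length from by simp, pv_erase_len]
  simp

theorem pvAMerge_spec_plain (c : Char) (rest : List Char) (d : List (List Char))
    (hm : ¬(c = '-' ∧ rest.head? = some '>')) :
    pvAMerge (d ++ [c] :: rest.map pvSing) d.length = d ++ [c] :: rest.map pvSing := by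
  unfold pvAMerge
  rw [if_neg]
  rintro ⟨h1, h2⟩
  rw [pv_getD_len d [c] _ []] at h1
  have hc : c = '-' := by simpa using h1
  match rest with
  | [] =>
      have e : d ++ [c] :: List.map pvSing [] = d ++ [[c]] := by simp
      rw [e] at h2
      rw [pv_getD_default _ _ _ (by simp)] at h2
      exact absurd h2 (by simp)
  | r :: rest' =>
      have e : d ++ [c] :: (r :: rest').map pvSing = (d ++ [[c]]) ++ [r] :: rest'.map pvSing := by
        simp [pvSing]
      rw [e, show d.length + 1 = (d ++ [[c]]).length from by simp, pv_getD_len _ _ _ []] at h2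
      exact hm ⟨hc, by simpa using h2⟩

theorem pvAAbsorb_spec (t : List Char) (rs : List Char) (d : List (List Char)) :
    pvAAbsorb (d ++ t :: rs.map pvSing) d.length
      = if t ∈ [['('], ['!'], ['*'], ['+']] then d ++ t :: rs.map pvSing
        else d ++ (t ++ rs.takeWhile PySem.Chars.isdigit) ::
              (rs.dropWhile PySem.Chars.isdigit).map pvSing := by
  unfold pvAAbsorb
  have hg : (d ++ t :: rs.map pvSing).getD d.length [] = t := pv_getD_len d t _ []
  have ht : pvATmp (d ++ t :: rs.map pvSing) (d.length + 1) = rs.takeWhile PySem.Chars.isdigit := by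
    have e : d ++ t :: rs.map pvSing = (d ++ [t]) ++ rs.map pvSing := by simp
    rw [e, show d.length + 1 = (d ++ [t]).length from by simp]
    exact pvATmp_spec rs (d ++ [t])
  rw [hg, ht]
  by_cases hex : t ∈ [['('], ['!'], ['*'], ['+']]
  · rw [if_pos hex, if_pos hex]
  · rw [if_neg hex, if_neg hex, pv_set_len, pv_take_len, pv_drop_len]
    have hsplit : rs.map pvSing
        = (rs.takeWhile PySem.Chars.isdigit).map pvSing
          ++ (rs.dropWhile PySem.Chars.isdigit).map pvSing := by
      rw [← List.map_append, List.takeWhile_append_dropWhile]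
    rw [hsplit, show (rs.takeWhile PySem.Chars.isdigit).length
          = ((rs.takeWhile PySem.Chars.isdigit).map pvSing).length from by simp]
    rw [List.drop_left]
    simp

theorem pvALoop_eq : ∀ (n : Nat) (cs : List Char), cs.length ≤ n → ∀ d : List (List Char),
    pvALoop (d ++ cs.map pvSing) d.length = d ++ pvF cs := by
  intro n
  induction n with
  | zero =>
      intro cs hcs d
      have h0 : cs = [] := List.eq_nil_of_length_eq_zero (by omega)
      subst h0
      unfold pvALoop; rw [pvF_nil]; simp
  | succ n ih =>
      intro cs hcs d
      match cs with
      | [] => unfold pvALoop; rw [pvF_nil]; simp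
      | c :: rest =>
        unfold pvALoop
        rw [dif_pos (by simp)]
        by_cases hm : c = '-' ∧ rest.head? = some '>'
        · obtain ⟨hc, hh⟩ := hm
          subst hc
          match rest with
          | [] => simp at hh
          | r :: rest' =>
            have hr : r = '>' := by simpa using hh
            subst hr
            have e0 : ('-' :: '>' :: rest').map pvSing = ['-'] :: ['>'] :: rest'.map pvSing := by
              simp [pvSing]
            rw [e0]
            have hstep : pvAStep (d ++ ['-'] :: ['>'] :: rest'.map pvSing) d.length
                = d ++ (['-', '>'] ++ rest'.takeWhile PySem.Chars.isdigit) ::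
                    (rest'.dropWhile PySem.Chars.isdigit).map pvSing := by
              unfold pvAStep
              rw [pvAMerge_spec_merge]
              rw [show (['-', '>'] :: rest'.map pvSing : List (List Char))
                    = (['-', '>'] : List Char) :: rest'.map pvSing from rfl]
              rw [pvAAbsorb_spec, if_neg (by decide)]
            rw [hstep]
            set t : List Char := ['-', '>'] ++ rest'.takeWhile PySem.Chars.isdigit with hts
            have e1 : d ++ t :: (rest'.dropWhile PySem.Chars.isdigit).map pvSing
                = (d ++ [t]) ++ (rest'.dropWhile PySem.Chars.isdigit).map pvSing := by simp
            rw [e1, show d.length + 1 = (d ++ [t]).length from by simp]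
            rw [ih (rest'.dropWhile PySem.Chars.isdigit)
                (by have := List.length_dropWhile_le (p := PySem.Chars.isdigit) (l := rest')
                    simp at hcs; omega) (d ++ [t])]
            rw [pvF_merge rest']
            simp [hts]
        · have e0 : (c :: rest).map pvSing = [c] :: rest.map pvSing := by simp [pvSing]
          rw [e0]
          have hstep : pvAStep (d ++ [c] :: rest.map pvSing) d.length
              = if ([c] : List Char) ∈ [['('], ['!'], ['*'], ['+']] then d ++ [c] :: rest.map pvSing
                else d ++ ([c] ++ rest.takeWhile PySem.Chars.isdigit) ::
                      (rest.dropWhile PySem.Chars.isdigit).map pvSing := by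
            unfold pvAStep
            rw [pvAMerge_spec_plain c rest d hm, pvAAbsorb_spec]
          by_cases hex : ([c] : List Char) ∈ [['('], ['!'], ['*'], ['+']]
          · rw [hstep, if_pos hex]
            have e1 : d ++ [c] :: rest.map pvSing = (d ++ [[c]]) ++ rest.map pvSing := by simp
            rw [e1, show d.length + 1 = (d ++ [[c]]).length from by simp]
            rw [ih rest (by simp at hcs; omega) (d ++ [[c]])]
            rw [pvF_plain_excl c rest hm hex]
            simp
          · rw [hstep, if_neg hex]
            set t : List Char := [c] ++ rest.takeWhile PySem.Chars.isdigit with hts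
            have e1 : d ++ t :: (rest.dropWhile PySem.Chars.isdigit).map pvSing
                = (d ++ [t]) ++ (rest.dropWhile PySem.Chars.isdigit).map pvSing := by simp
            rw [e1, show d.length + 1 = (d ++ [t]).length from by simp]
            rw [ih (rest.dropWhile PySem.Chars.isdigit)
                (by have := List.length_dropWhile_le (p := PySem.Chars.isdigit) (l := rest)
                    simp at hcs; omega) (d ++ [t])]
            rw [pvF_plain_abs c rest hm hex]
            simp [hts]

-- ---- B side ----

theorem pvPass1_digits (ds : List Char) (l : List Char)
    (h : ∀ c ∈ ds, PySem.Chars.isdigit c = true) :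
    pvPass1 (ds ++ l) = ds.map pvSing ++ pvPass1 l := by
  induction ds with
  | nil => simp
  | cons d ds ih =>
      have hd : PySem.Chars.isdigit d = true := h d (by simp)
      have hnd : d ≠ '-' := by intro he; rw [he] at hd; simp [PySem.Chars.isdigit] at hd
      rw [show (d :: ds) ++ l = d :: (ds ++ l) from rfl]
      rw [pvPass1_plain d (ds ++ l) (by rintro ⟨h1, _⟩; exact hnd h1)]
      rw [ih (fun c hc => h c (by simp [hc]))]
      simp [pvSing]

theorem pvPass2_absorb (ds : List Char) : ∀ (out : List (List Char)) (t : List Char)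
    (ts : List (List Char)), (∀ c ∈ ds, PySem.Chars.isdigit c = true) → t ≠ [] →
    t ∉ [['('], ['!'], ['*'], ['+']] →
    pvPass2 (out ++ [t]) (ds.map pvSing ++ ts) = pvPass2 (out ++ [t ++ ds]) ts := by
  induction ds with
  | nil => intro out t ts _ _ _; simp
  | cons d ds ih =>
      intro out t ts hds ht hex
      have hd : PySem.Chars.isdigit d = true := hds d (by simp)
      rw [show (d :: ds).map pvSing ++ ts = pvSing d :: (ds.map pvSing ++ ts) from by simp]
      rw [pvPass2_cons, if_pos (⟨by
            rw [show (pvSing d : List Char) = [d] from rfl, pv_strIsdigit_sing]; exact hd,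
          by simp, by rw [List.getLastD_concat]; exact hex⟩)]
      rw [List.dropLast_concat, List.getLastD_concat]
      rw [show (pvSing d : List Char) = [d] from rfl]
      rw [ih out (t ++ [d]) ts (fun c hc => hds c (by simp [hc]))
          (by simp) (pv_notExcl_two _ (by
            have h1 : t.length ≠ 0 := fun h => ht (List.eq_nil_of_length_eq_zero h)
            simp only [List.length_append, List.length_cons, List.length_nil]
            omega))]
      simp

theorem pvPass2_eq : ∀ (n : Nat) (cs : List Char), cs.length ≤ n → ∀ out : List (List Char),
    (out = [] ∨ out.getLastD [] ∈ [['('], ['!'], ['*'], ['+']]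
      ∨ (∀ hd, cs.head? = some hd → PySem.Chars.isdigit hd = false)) →
    pvPass2 out (pvPass1 cs) = out ++ pvF cs := by
  intro n
  induction n with
  | zero =>
      intro cs hcs out _
      have h0 : cs = [] := List.eq_nil_of_length_eq_zero (by omega)
      subst h0
      rw [pvF_nil]; unfold pvPass1 pvPass2; simp
  | succ n ih =>
      intro cs hcs out hout
      match cs with
      | [] => rw [pvF_nil]; unfold pvPass1 pvPass2; simp
      | c :: rest =>
        by_cases hm : c = '-' ∧ rest.head? = some '>'
        · rw [pvPass1_merge c rest hm]
          rw [pvPass2_cons, if_neg (by rintro ⟨h1, _⟩; exact absurd h1 (by decide))]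
          have hsplit : pvPass1 rest.tail
              = (rest.tail.takeWhile PySem.Chars.isdigit).map pvSing
                ++ pvPass1 (rest.tail.dropWhile PySem.Chars.isdigit) := by
            conv_lhs => rw [← List.takeWhile_append_dropWhile (p := PySem.Chars.isdigit)
              (l := rest.tail)]
            exact pvPass1_digits _ _ (fun c hc => List.mem_takeWhile_imp hc)
          rw [hsplit]
          rw [pvPass2_absorb _ _ _ _ (fun c hc => List.mem_takeWhile_imp hc) (by simp)
              (by decide)]
          rw [ih (rest.tail.dropWhile PySem.Chars.isdigit)
              (by have h1 := List.length_dropWhile_le (p := PySem.Chars.isdigit) (l := rest.tail)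
                  have h2 : rest.tail.length = rest.length - 1 := List.length_tail
                  simp at hcs; omega)
              _ (Or.inr (Or.inr (fun hd hhd => pv_head_dropWhile _ _ _ hhd)))]
          rw [show pvF (c :: rest)
                = (['-', '>'] ++ rest.tail.takeWhile PySem.Chars.isdigit) ::
                    pvF (rest.tail.dropWhile PySem.Chars.isdigit) from by
            obtain ⟨rfl, hh⟩ := hm
            match rest with
            | [] => simp at hh
            | r :: rest' =>
                have hr : r = '>' := by simpa using hh
                subst hr
                simpa using pvF_merge rest']
          simp
        · rw [pvPass1_plain c rest hm]
          by_cases hex : ([c] : List Char) ∈ [['('], ['!'], ['*'], ['+']]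
          · rw [pvPass2_cons, if_neg (by
                rintro ⟨h1, _⟩
                rw [pv_strIsdigit_sing, pv_excl_notdig c hex] at h1
                exact absurd h1 (by simp))]
            rw [ih rest (by simp at hcs; omega) _
                (Or.inr (Or.inl (by rw [List.getLastD_concat]; exact hex)))]
            rw [pvF_plain_excl c rest hm hex]
            simp
          · have hpush : pvPass2 out ([c] :: pvPass1 rest) = pvPass2 (out ++ [[c]]) (pvPass1 rest) := by
              rw [pvPass2_cons]
              by_cases hdc : PySem.Chars.isdigit c
              · rcases hout with h0 | h0 | h0
                · rw [if_neg (by rintro ⟨_, h2, _⟩; exact h2 h0)]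
                · rw [if_neg (by rintro ⟨_, _, h3⟩; exact h3 h0)]
                · exact absurd (h0 c rfl) (by simp [hdc])
              · rw [if_neg (by
                  rintro ⟨h1, _⟩
                  rw [pv_strIsdigit_sing] at h1
                  exact hdc h1)]
            rw [hpush]
            have hsplit : pvPass1 rest
                = (rest.takeWhile PySem.Chars.isdigit).map pvSing
                  ++ pvPass1 (rest.dropWhile PySem.Chars.isdigit) := by
              conv_lhs => rw [← List.takeWhile_append_dropWhile (p := PySem.Chars.isdigit)
                (l := rest)]
              exact pvPass1_digits _ _ (fun c hc => List.mem_takeWhile_imp hc)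
            rw [hsplit]
            rw [pvPass2_absorb _ _ _ _ (fun c hc => List.mem_takeWhile_imp hc) (by simp) hex]
            rw [ih (rest.dropWhile PySem.Chars.isdigit)
                (by have h1 := List.length_dropWhile_le (p := PySem.Chars.isdigit) (l := rest)
                    simp at hcs; omega)
                _ (Or.inr (Or.inr (fun hd hhd => pv_head_dropWhile _ _ _ hhd)))]
            rw [pvF_plain_abs c rest hm hex]
            simp

-- ---- glue ----

theorem pv_decode_A (cf : String) :
    decode_formula cf = (pvF cf.toList).map String.ofList := by
  unfold decode_formula
  have h := pvALoop_eq cf.toList.length cf.toList le_rfl []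
  simp only [List.nil_append, List.length_nil] at h
  rw [show (cf.toList.map (fun c => [c]) : List (List Char)) = cf.toList.map pvSing from rfl, h]

theorem pv_decode_B (cf : String) :
    decode_formula_alt cf = (pvF cf.toList).map String.ofList := by
  unfold decode_formula_alt
  have h := pvPass2_eq cf.toList.length cf.toList le_rfl [] (Or.inl rfl)
  rw [h]
  simp

-- ===== VERDICT (by name: the statement is the Claim_ definition above) =====
theorem decode_formula_spec : Claim_equal_decode_formula := by
  intro cf _ _
  unfold Spec_decode_formula
  rw [pv_decode_A, pv_decode_B]
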